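-- pv_equiv track=rewrite | github.com/andyrbm/abbrs | load/load_reg_model.py | limit_abbrlist
-- ===== SOURCE A (Python) =====
-- def limit_abbrlist(company_name, abbrlist):
--     ret_list = []
--     for abbr in abbrlist:
--         if abbr != company_name and abbr not in ret_list:
--             ret_list.append(abbr)
--         if len(ret_list) == 5:
--             break
--     return ret_list
-- ===== SOURCE B (Python) =====
-- def limit_abbrlist(company_name, abbrlist):
--     uniq = list(dict.fromkeys(abbrlist))
--     return [x for x in uniq if x != company_name][:5]
-- ===== Notes on version B (the rewrite author's own statement) =====
-- stated objective: idiomatic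
-- what changed: Replaced A's single guarded loop with an early break by three independent phases: order-preserving dedup of the whole list via dict.fromkeys, then a comprehension filtering out company_name, then a [:5] slice.
import Mathlib
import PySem

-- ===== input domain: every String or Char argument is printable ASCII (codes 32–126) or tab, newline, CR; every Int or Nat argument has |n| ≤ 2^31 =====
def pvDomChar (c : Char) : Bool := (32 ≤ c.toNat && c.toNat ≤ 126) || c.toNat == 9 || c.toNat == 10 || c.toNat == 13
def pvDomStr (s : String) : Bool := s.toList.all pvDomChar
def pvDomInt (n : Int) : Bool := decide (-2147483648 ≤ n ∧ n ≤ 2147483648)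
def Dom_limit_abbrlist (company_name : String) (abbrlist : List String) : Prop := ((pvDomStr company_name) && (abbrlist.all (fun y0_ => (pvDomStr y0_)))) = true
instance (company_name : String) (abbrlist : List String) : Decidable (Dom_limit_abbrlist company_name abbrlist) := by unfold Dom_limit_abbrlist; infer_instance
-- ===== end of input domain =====

-- B replaces A's single guarded loop with early break by three phases (dict.fromkeys dedup,
-- filter out company_name, take first 5): idiomatic decomposition, no speed claim.

-- ===== PORT A =====
-- the loop of A: carries ret_list; appends when abbr != company_name and not yet present;
-- breaks as soon as len(ret_list) == 5
def limitA_loop (company_name : String) (l : List String) (ret_list : List String) : List String :=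
  match l with
  | [] => ret_list
  | abbr :: rest =>
    let ret' := if abbr ≠ company_name ∧ ¬ ret_list.contains abbr then ret_list ++ [abbr] else ret_list
    if ret'.length = 5 then ret' else limitA_loop company_name rest ret'

def limit_abbrlist (company_name : String) (abbrlist : List String) : List String :=
  limitA_loop company_name abbrlist []

-- ===== PORT B =====
-- list(dict.fromkeys(abbrlist)) = PySem.List.dedup (first occurrences, in order);
-- the comprehension is filter, [:5] is take 5
def limit_abbrlist_alt (company_name : String) (abbrlist : List String) : List String :=
  ((PySem.List.dedup abbrlist).filter (fun x => x != company_name)).take 5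

-- ===== PRECONDITION & SPEC =====
def Spec_limit_abbrlist (company_name : String) (abbrlist : List String) (out : List String) : Prop := out = limit_abbrlist_alt company_name abbrlist
instance (company_name : String) (abbrlist : List String) (out : List String) : Decidable (Spec_limit_abbrlist company_name abbrlist out) := by unfold Spec_limit_abbrlist; infer_instance

-- ===== CLAIM (what is proved, stated in full; the proofs are below) =====
def Claim_equal_limit_abbrlist : Prop := ∀ (company_name : String) (abbrlist : List String), Dom_limit_abbrlist company_name abbrlist → Spec_limit_abbrlist company_name abbrlist (limit_abbrlist company_name abbrlist)

-- ===== LEMMAS AND PROOFS =====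

-- B's dedup phase written as the structural recursion the invariant proof walks
def dedupB (l : List String) (uniq : List String) : List String :=
  match l with
  | [] => uniq
  | abbr :: rest => dedupB rest (if ¬ uniq.contains abbr then uniq ++ [abbr] else uniq)

theorem dedupB_eq_foldl (l uniq : List String) :
    dedupB l uniq = l.foldl PySem.Set.add uniq := by
  induction l generalizing uniq with
  | nil => rfl
  | cons a rest ih =>
    simp only [dedupB, List.foldl_cons, PySem.Set.add]
    split <;> split <;> simp_all

-- A's loop run to completion, without the break (the reference full fold)
def limitF (company_name : String) (l : List String) (acc : List String) : List String :=
  match l with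
  | [] => acc
  | abbr :: rest =>
    limitF company_name rest (if abbr ≠ company_name ∧ ¬ acc.contains abbr then acc ++ [abbr] else acc)

theorem limitF_prefix (cn : String) (l acc : List String) : acc <+: limitF cn l acc := by
  induction l generalizing acc with
  | nil => exact List.prefix_refl _
  | cons a rest ih =>
    simp only [limitF]
    split
    · exact List.IsPrefix.trans (List.prefix_append _ _) (ih _)
    · exact ih _

-- the break is only an optimisation: A's loop equals take 5 of the full fold
theorem limitA_eq_take (cn : String) (l acc : List String) (h : acc.length < 5) :
    limitA_loop cn l acc = (limitF cn l acc).take 5 := by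
  induction l generalizing acc with
  | nil => simp [limitA_loop, limitF, List.take_of_length_le (Nat.le_of_lt h)]
  | cons a rest ih =>
    simp only [limitA_loop, limitF]
    set acc' := if a ≠ cn ∧ ¬ acc.contains a then acc ++ [a] else acc with hacc'
    have hlen : acc'.length ≤ 5 := by
      rw [hacc']; split <;> first | (simp; omega) | omega
    by_cases h5 : acc'.length = 5
    · simp only [h5, if_true]
      obtain ⟨t, ht⟩ := limitF_prefix cn rest acc'
      rw [← ht, List.take_append_of_le_length (by omega), List.take_of_length_le (by omega)]
    · rw [if_neg h5]
      exact ih acc' (lt_of_le_of_ne hlen h5)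

-- the full fold equals filtering B's dedup, via the invariant acc = uniq.filter (≠ cn)
theorem limitF_eq_filter_dedup (cn : String) (l uniq : List String) :
    limitF cn l (uniq.filter (fun x => x != cn)) = (dedupB l uniq).filter (fun x => x != cn) := by
  induction l generalizing uniq with
  | nil => simp [limitF, dedupB]
  | cons a rest ih =>
    simp only [limitF, dedupB]
    by_cases hcn : a = cn
    · subst hcn
      have : ¬ (a ≠ a ∧ ¬ (uniq.filter (fun x => x != a)).contains a) := by simp
      rw [if_neg this]
      split
      · have : (uniq ++ [a]).filter (fun x => x != a) = uniq.filter (fun x => x != a) := by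
          simp [List.filter_append]
        rw [← this]; exact ih _
      · exact ih _
    · have hmem : (uniq.filter (fun x => x != cn)).contains a = uniq.contains a := by
        simp [List.mem_filter, hcn]
      simp only [hmem]
      by_cases hu : uniq.contains a = true
      · rw [if_neg (fun h => h.2 hu), if_neg (fun h => h hu)]
        exact ih _
      · rw [if_pos ⟨hcn, hu⟩, if_pos hu]
        have : uniq.filter (fun x => x != cn) ++ [a] = (uniq ++ [a]).filter (fun x => x != cn) := by
          simp [List.filter_append, hcn]
        rw [this]; exact ih _

-- ===== VERDICT (by name: the statement is the Claim_ definition above) =====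
theorem limit_abbrlist_spec : Claim_equal_limit_abbrlist := by
  intro cn l _
  show limit_abbrlist cn l = limit_abbrlist_alt cn l
  unfold limit_abbrlist limit_abbrlist_alt
  rw [limitA_eq_take cn l [] (by simp)]
  have h := limitF_eq_filter_dedup cn l []
  simp only [List.filter_nil] at h
  rw [h, dedupB_eq_foldl]
  rw [PySem.List.dedup_eq_ofList, PySem.Set.ofList_eq_foldl]
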